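-- pv_equiv track=rewrite | github.com/inet-framework/inet | python/inet/test/feature.py | get_defined_types_to_feature
-- ===== SOURCE A (Python) =====
-- def get_defined_types(package_to_defined_types):
--     result = []
--     for key, value in package_to_defined_types.items():
--         result += value
--     result = list(set(result))
--     result.sort()
--     return result
--
-- def get_defined_type_to_package(package_to_defined_types):
--     result = dict()
--     for package, defined_types in package_to_defined_types.items():
--         for defined_type in defined_types:
--             result[defined_type] = package
--     return result
--
-- def get_package_to_feature(feature_to_packages):
--     result = dict()
--     for feature, packages in feature_to_packages.items():
--         for package in packages:
--             result[package] = feature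
--     return result
--
-- def get_defined_types_to_feature(package_to_defined_types, feature_to_packages):
--     result = dict()
--     defined_types = get_defined_types(package_to_defined_types)
--     defined_type_to_package = get_defined_type_to_package(package_to_defined_types)
--     package_to_feature = get_package_to_feature(feature_to_packages)
--     for defined_type in defined_types:
--         package = defined_type_to_package[defined_type]
--         feature = package_to_feature[package]
--         result[defined_type] = feature
--     return result
-- ===== SOURCE B (Python) =====
-- def get_defined_types_to_feature(package_to_defined_types, feature_to_packages):
--     def last_match(mapping, x):
--         # key of the last mapping entry whose value list contains x (= last-write-wins)
--         for key, values in reversed(mapping.items()):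
--             if x in values:
--                 return key
--         raise KeyError(x)
--     types = sorted({t for ts in package_to_defined_types.values() for t in ts})
--     return {t: last_match(feature_to_packages, last_match(package_to_defined_types, t))
--             for t in types}
-- ===== Notes on version B (the rewrite author's own statement) =====
-- stated objective: alternative
-- what changed: B builds no lookup tables at all: instead of A's two inverted dicts (type-to-package, package-to-feature) it resolves each sorted type by a reverse linear scan of the source dicts (first match when scanning backwards = A's last-write-wins), trading precomputed hash maps for direct nested scans.
import Mathlib
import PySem

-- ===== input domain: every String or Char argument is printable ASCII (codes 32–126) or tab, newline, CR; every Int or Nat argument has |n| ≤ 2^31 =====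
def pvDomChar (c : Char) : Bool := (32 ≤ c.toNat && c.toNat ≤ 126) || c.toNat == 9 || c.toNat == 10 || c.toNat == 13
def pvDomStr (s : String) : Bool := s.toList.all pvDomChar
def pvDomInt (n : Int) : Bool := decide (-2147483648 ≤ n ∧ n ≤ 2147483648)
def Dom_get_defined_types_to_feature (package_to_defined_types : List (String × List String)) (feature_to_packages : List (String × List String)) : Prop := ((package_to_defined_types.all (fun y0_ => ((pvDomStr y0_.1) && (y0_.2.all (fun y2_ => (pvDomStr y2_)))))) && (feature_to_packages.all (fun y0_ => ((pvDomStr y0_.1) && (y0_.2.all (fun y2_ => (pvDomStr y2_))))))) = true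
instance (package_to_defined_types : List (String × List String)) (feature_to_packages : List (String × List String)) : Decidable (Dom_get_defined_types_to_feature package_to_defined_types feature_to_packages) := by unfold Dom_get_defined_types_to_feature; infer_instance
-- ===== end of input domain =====

-- B builds no lookup tables at all: it resolves each sorted defined type by reverse linear scans
-- of the two source dicts (first match scanning backwards = A's last-write-wins inverted dicts);
-- equality of the RETURN value.

-- ===== PORT A =====
def pvA_get_defined_types (package_to_defined_types : List (String × List String)) : List String :=
  -- result = []; for key, value in items: result += value; result = list(set(result)); result.sort()
  let result := (PySem.Dict.ofList package_to_defined_types).items.foldl (fun acc kv => acc ++ kv.2) []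
  PySem.List.sorted (PySem.Set.ofList result) (fun x => x)

def pvA_get_defined_type_to_package (package_to_defined_types : List (String × List String)) : PySem.Dict String String :=
  (PySem.Dict.ofList package_to_defined_types).items.foldl
    (fun d kv => kv.2.foldl (fun d t => d.insert t kv.1) d) PySem.Dict.empty

def pvA_get_package_to_feature (feature_to_packages : List (String × List String)) : PySem.Dict String String :=
  (PySem.Dict.ofList feature_to_packages).items.foldl
    (fun d kv => kv.2.foldl (fun d p => d.insert p kv.1) d) PySem.Dict.empty

-- dict lookups defined_type_to_package[t] / package_to_feature[pkg] raise KeyError on a missing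
-- key; Pre_ excludes exactly those inputs, so getD with default "" is exact under Pre_.
def get_defined_types_to_feature (package_to_defined_types : List (String × List String)) (feature_to_packages : List (String × List String)) : List (String × String) :=
  let defined_types := pvA_get_defined_types package_to_defined_types
  let defined_type_to_package := pvA_get_defined_type_to_package package_to_defined_types
  let package_to_feature := pvA_get_package_to_feature feature_to_packages
  (defined_types.foldl
    (fun r t => r.insert t (package_to_feature.getD (defined_type_to_package.getD t "") ""))
    PySem.Dict.empty).items

-- ===== PORT B =====
-- last_match(mapping, x): scan reversed(mapping.items()), return the first key whose value list
-- contains x; the final 'raise KeyError' is excluded by Pre_, so "" there is exact under Pre_.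
def pvB_last_match (mapping : List (String × List String)) (x : String) : String :=
  match (PySem.Dict.ofList mapping).items.reverse.find? (fun kv => kv.2.contains x) with
  | some kv => kv.1
  | none => ""

def get_defined_types_to_feature_alt (package_to_defined_types : List (String × List String)) (feature_to_packages : List (String × List String)) : List (String × String) :=
  -- types = sorted({t for ts in package_to_defined_types.values() for t in ts})
  let types := PySem.List.sorted (PySem.Set.ofList ((PySem.Dict.ofList package_to_defined_types).values.flatMap (fun ts => ts))) (fun x => x)
  -- {t: last_match(feature_to_packages, last_match(package_to_defined_types, t)) for t in types}
  (types.foldl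
    (fun r t => r.insert t (pvB_last_match feature_to_packages (pvB_last_match package_to_defined_types t)))
    PySem.Dict.empty).items

-- ===== PRECONDITION & SPEC =====
def pvFeaturePkgs (feature_to_packages : List (String × List String)) : List String :=
  (PySem.Dict.ofList feature_to_packages).items.flatMap (·.2)

def pvLastCovered (featPkgs : List String) : List (String × List String) → Bool
  | [] => true
  | kv :: rest =>
      kv.2.all (fun t => rest.any (fun kv' => kv'.2.contains t) || featPkgs.contains kv.1)
        && pvLastCovered featPkgs rest

-- Pre_ excludes exactly the inputs on which A raises KeyError: some defined type whose last
-- defining package is listed under no feature.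
def Pre_get_defined_types_to_feature (package_to_defined_types : List (String × List String)) (feature_to_packages : List (String × List String)) : Prop :=
  pvLastCovered (pvFeaturePkgs feature_to_packages) (PySem.Dict.ofList package_to_defined_types).items = true
instance (package_to_defined_types : List (String × List String)) (feature_to_packages : List (String × List String)) : Decidable (Pre_get_defined_types_to_feature package_to_defined_types feature_to_packages) := by unfold Pre_get_defined_types_to_feature; infer_instance

def pvWitness_get_defined_types_to_feature : (List (String × List String)) × (List (String × List String)) :=
  ([("pkg", ["TypeA", "TypeB"])], [("feat", ["pkg"])])

def Spec_get_defined_types_to_feature (package_to_defined_types : List (String × List String)) (feature_to_packages : List (String × List String)) (out : List (String × String)) : Prop := out = get_defined_types_to_feature_alt package_to_defined_types feature_to_packages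
instance (package_to_defined_types : List (String × List String)) (feature_to_packages : List (String × List String)) (out : List (String × String)) : Decidable (Spec_get_defined_types_to_feature package_to_defined_types feature_to_packages out) := by unfold Spec_get_defined_types_to_feature; infer_instance

-- ===== CLAIM (what is proved, stated in full; the proofs are below) =====
def Claim_equal_get_defined_types_to_feature : Prop := ∀ (package_to_defined_types : List (String × List String)) (feature_to_packages : List (String × List String)), Dom_get_defined_types_to_feature package_to_defined_types feature_to_packages → Pre_get_defined_types_to_feature package_to_defined_types feature_to_packages → Spec_get_defined_types_to_feature package_to_defined_types feature_to_packages (get_defined_types_to_feature package_to_defined_types feature_to_packages)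

-- ===== LEMMAS AND PROOFS =====

-- the inverted-dict building loop of A
def pvFold (l : List (String × List String)) : PySem.Dict String String :=
  l.foldl (fun d kv => kv.2.foldl (fun d t => d.insert t kv.1) d) PySem.Dict.empty

-- inserting every t ∈ ts with the same value k
lemma pvInner_getD (ts : List String) (d : PySem.Dict String String) (k x : String) :
    (ts.foldl (fun d t => d.insert t k) d).getD x ""
      = if ts.contains x then k else d.getD x "" := by
  induction ts generalizing d with
  | nil => simp
  | cons a ts ih =>
    rw [List.foldl_cons, ih, PySem.Dict.getD_insert]
    simp only [List.contains_cons]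
    by_cases h : x = a <;> simp [h]

-- the whole inverted dict looks up as a reverse-scan first match
lemma pvFold_getD_eq_find (l : List (String × List String)) (d : PySem.Dict String String) (x : String) :
    (l.foldl (fun d kv => kv.2.foldl (fun d t => d.insert t kv.1) d) d).getD x ""
      = match l.reverse.find? (fun kv => kv.2.contains x) with
        | some kv => kv.1
        | none => d.getD x "" := by
  induction l generalizing d with
  | nil => simp
  | cons kv l ih =>
    rw [List.foldl_cons, ih, List.reverse_cons, List.find?_append]
    cases h : l.reverse.find? (fun kv => kv.2.contains x) with
    | some kv' => simp
    | none =>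
      simp only [List.find?_singleton]
      rw [pvInner_getD]
      by_cases hm : x ∈ kv.2 <;> simp [hm]

lemma pvLookup_eq (l : List (String × List String)) (x : String) :
    (pvFold (PySem.Dict.ofList l).items).getD x "" = pvB_last_match l x := by
  unfold pvFold pvB_last_match
  rw [pvFold_getD_eq_find]
  cases (PySem.Dict.ofList l).items.reverse.find? (fun kv => kv.2.contains x) <;> simp

-- A's flattened values accumulator is B's flatMap over values
lemma pvTypes_eq (l : List (String × List String)) :
    (PySem.Dict.ofList l).items.foldl (fun acc kv => acc ++ kv.2) []
      = (PySem.Dict.ofList l).values.flatMap (fun ts => ts) := by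
  rw [PySem.List.foldl_append_eq_flatMap]
  simp [PySem.Dict.values, List.flatMap_map]

-- ===== VERDICT (by name: the statement is the Claim_ definition above) =====
theorem get_defined_types_to_feature_spec : Claim_equal_get_defined_types_to_feature := by
  intro p f _ _
  unfold Spec_get_defined_types_to_feature
  unfold get_defined_types_to_feature get_defined_types_to_feature_alt
  unfold pvA_get_defined_types pvA_get_defined_type_to_package pvA_get_package_to_feature
  simp only []
  rw [pvTypes_eq]
  congr 2
  funext r t
  rw [show ((PySem.Dict.ofList p).items.foldl (fun d kv => kv.2.foldl (fun d t => d.insert t kv.1) d) PySem.Dict.empty) = pvFold (PySem.Dict.ofList p).items from rfl]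
  rw [show ((PySem.Dict.ofList f).items.foldl (fun d kv => kv.2.foldl (fun d p => d.insert p kv.1) d) PySem.Dict.empty) = pvFold (PySem.Dict.ofList f).items from rfl]
  rw [pvLookup_eq, pvLookup_eq]
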